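-- pv_equiv track=rewrite | github.com/gdkelly153/Nuudle-MVP | backend/ai_service.py | analyze_ai_interactions
-- ===== SOURCE A (Python) =====
-- from typing import Dict, List, Optional, Any
--
-- def analyze_ai_interactions(ai_interaction_log: List[Dict], session_data: Dict) -> Dict[str, str]:
--     """Analyze AI interactions and generate adaptive feedback"""
--     if not ai_interaction_log or len(ai_interaction_log) == 0:
--         return {
--             "aiInteractionAnalysis": "No AI interactions were recorded during this session.",
--             "feedbackStrengths": "Provide a concise analysis of where the user's thinking was most effective. Your analysis must specifically evaluate their performance on the following four dimensions: 1. **Root Cause Identification**: Did they distinguish between symptoms and true root causes? 2. **Assumption Surfacing**: Did they uncover non-obvious or deeply held assumptions? 3. **Self-Awareness (from Perpetuations)**: Did they identify specific, plausible actions that could perpetuate the problem and acknowledge their own role? 4. **Action Plan Quality**: Is their action plan specific, measurable, and directly linked to the root causes? Select the 1-2 dimensions where the user showed the most strength and provide specific examples from their session inputs.",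
--             "feedbackGrowth": "Provide specific, actionable recommendations for improvement. Your analysis must evaluate their performance on the same four dimensions and provide concrete next steps: 1. **Root Cause Identification**: If they mistook symptoms for root causes, explain why and suggest deeper causes to explore. 2. **Assumption Surfacing**: If their assumptions were surface-level, suggest specific deeper beliefs to examine. 3. **Self-Awareness (from Perpetuations)**: If they struggled to see their own role, provide specific behaviors to watch for. 4. **Action Plan Quality**: If their plan was vague, provide specific ways to make it more actionable. Select the 1-2 dimensions with the most opportunity for growth and provide specific, implementable recommendations."
--         }
--
--     # Generate analysis text for the prompt
--     stages = [interaction.get('stage', '') for interaction in ai_interaction_log]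
--     ai_interaction_analysis = f"AI Interaction Log Analysis: During this session, you received AI assistance on {len(ai_interaction_log)} occasion(s) across the following stages: {', '.join(stages)}. Use this information to provide adaptive feedback that recognizes whether the user incorporated AI suggestions effectively or missed valuable opportunities for improvement."
--
--     # Generate adaptive feedback based on interaction patterns
--     has_root_cause = any(i.get('stage') == 'root_cause' for i in ai_interaction_log)
--     has_assumptions = any(i.get('stage') == 'identify_assumptions' for i in ai_interaction_log)
--     has_perpetuation = any(i.get('stage') == 'perpetuation' for i in ai_interaction_log)
--     has_actions = any(i.get('stage') in ['potential_actions', 'action_planning'] for i in ai_interaction_log)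
--
--     feedback_strengths = f"Provide a concise analysis of where the user's thinking was most effective, taking into account their {'engagement with AI assistance' if len(ai_interaction_log) > 0 else 'independent work'}. Your analysis must specifically evaluate their performance on the following four dimensions: 1. **Root Cause Identification**: Did they distinguish between symptoms and true root causes? {'Consider how they responded to AI guidance on root causes.' if has_root_cause else ''} 2. **Assumption Surfacing**: Did they uncover non-obvious or deeply held assumptions? {'Consider how they engaged with AI assistance on assumptions.' if has_assumptions else ''} 3. **Self-Awareness (from Perpetuations)**: Did they identify specific, plausible actions that could perpetuate the problem and acknowledge their own role? {'Consider how they responded to AI guidance on perpetuation patterns.' if has_perpetuation else ''} 4. **Action Plan Quality**: Is their action plan specific, measurable, and directly linked to the root causes? {'Consider how they incorporated AI feedback on their action planning.' if has_actions else ''} Select the 1-2 dimensions where the user showed the most strength and provide specific examples from their session inputs."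
--
--     # Build feedback_growth string with proper escaping
--     feedback_growth_parts = [
--         "Provide specific, actionable recommendations for improvement, considering their ",
--         "use of AI assistance" if len(ai_interaction_log) > 0 else "independent approach",
--         ". Your analysis must evaluate their performance on the same four dimensions and provide concrete next steps: ",
--         "1. **Root Cause Identification**: If they mistook symptoms for root causes, explain why and suggest deeper causes to explore. "
--     ]
--
--     if has_root_cause:
--         feedback_growth_parts.append("If they received AI guidance on root causes but didn't fully incorporate it, gently challenge them to revisit those insights. ")
--
--     feedback_growth_parts.extend([
--         "2. **Assumption Surfacing**: If their assumptions were surface-level, suggest specific deeper beliefs to examine. "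
--     ])
--
--     if has_assumptions:
--         feedback_growth_parts.append("If they received AI help with assumptions but didn't act on it, encourage them to test those assumptions. ")
--
--     feedback_growth_parts.extend([
--         "3. **Self-Awareness (from Perpetuations)**: If they struggled to see their own role, provide specific behaviors to watch for. "
--     ])
--
--     if has_perpetuation:
--         feedback_growth_parts.append("If they received AI insights about perpetuation patterns but didn't acknowledge their role, provide specific examples to watch for. ")
--
--     feedback_growth_parts.extend([
--         "4. **Action Plan Quality**: If their plan was vague, provide specific ways to make it more actionable. "
--     ])
--
--     if has_actions:
--         feedback_growth_parts.append("If they received AI feedback on their actions but didn't refine them, suggest specific improvements. ")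
--
--     feedback_growth_parts.append("Select the 1-2 dimensions with the most opportunity for growth and provide specific, implementable recommendations.")
--
--     feedback_growth = "".join(feedback_growth_parts)
--
--     return {
--         "aiInteractionAnalysis": ai_interaction_analysis,
--         "feedbackStrengths": feedback_strengths,
--         "feedbackGrowth": feedback_growth
--     }
-- ===== SOURCE B (Python) =====
-- # Table-driven rewrite: one pass collects the stage set, then a single loop over a
-- # dimension table assembles both feedback strings (A uses four any() scans and two
-- # monolithic f-string/parts constructions).
--
-- _STRENGTH_HEADER = ("Provide a concise analysis of where the user's thinking was most effective, "
--                     "taking into account their engagement with AI assistance. Your analysis must "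
--                     "specifically evaluate their performance on the following four dimensions: ")
-- _STRENGTH_TAIL = ("Select the 1-2 dimensions where the user showed the most strength and provide "
--                   "specific examples from their session inputs.")
-- _GROWTH_HEADER = ("Provide specific, actionable recommendations for improvement, considering their "
--                   "use of AI assistance. Your analysis must evaluate their performance on the same "
--                   "four dimensions and provide concrete next steps: ")
-- _GROWTH_TAIL = ("Select the 1-2 dimensions with the most opportunity for growth and provide "
--                 "specific, implementable recommendations.")
--
-- _DIMS = [
--     (('root_cause',),
--      "1. **Root Cause Identification**: Did they distinguish between symptoms and true root causes?",
--      "Consider how they responded to AI guidance on root causes.",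
--      "1. **Root Cause Identification**: If they mistook symptoms for root causes, explain why and suggest deeper causes to explore. ",
--      "If they received AI guidance on root causes but didn't fully incorporate it, gently challenge them to revisit those insights. "),
--     (('identify_assumptions',),
--      "2. **Assumption Surfacing**: Did they uncover non-obvious or deeply held assumptions?",
--      "Consider how they engaged with AI assistance on assumptions.",
--      "2. **Assumption Surfacing**: If their assumptions were surface-level, suggest specific deeper beliefs to examine. ",
--      "If they received AI help with assumptions but didn't act on it, encourage them to test those assumptions. "),
--     (('perpetuation',),
--      "3. **Self-Awareness (from Perpetuations)**: Did they identify specific, plausible actions that could perpetuate the problem and acknowledge their own role?",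
--      "Consider how they responded to AI guidance on perpetuation patterns.",
--      "3. **Self-Awareness (from Perpetuations)**: If they struggled to see their own role, provide specific behaviors to watch for. ",
--      "If they received AI insights about perpetuation patterns but didn't acknowledge their role, provide specific examples to watch for. "),
--     (('potential_actions', 'action_planning'),
--      "4. **Action Plan Quality**: Is their action plan specific, measurable, and directly linked to the root causes?",
--      "Consider how they incorporated AI feedback on their action planning.",
--      "4. **Action Plan Quality**: If their plan was vague, provide specific ways to make it more actionable. ",
--      "If they received AI feedback on their actions but didn't refine them, suggest specific improvements. "),
-- ]
--
--
-- def analyze_ai_interactions(ai_interaction_log, session_data):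
--     if not ai_interaction_log:
--         return {
--             "aiInteractionAnalysis": "No AI interactions were recorded during this session.",
--             "feedbackStrengths": "Provide a concise analysis of where the user's thinking was most effective. Your analysis must specifically evaluate their performance on the following four dimensions: 1. **Root Cause Identification**: Did they distinguish between symptoms and true root causes? 2. **Assumption Surfacing**: Did they uncover non-obvious or deeply held assumptions? 3. **Self-Awareness (from Perpetuations)**: Did they identify specific, plausible actions that could perpetuate the problem and acknowledge their own role? 4. **Action Plan Quality**: Is their action plan specific, measurable, and directly linked to the root causes? Select the 1-2 dimensions where the user showed the most strength and provide specific examples from their session inputs.",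
--             "feedbackGrowth": "Provide specific, actionable recommendations for improvement. Your analysis must evaluate their performance on the same four dimensions and provide concrete next steps: 1. **Root Cause Identification**: If they mistook symptoms for root causes, explain why and suggest deeper causes to explore. 2. **Assumption Surfacing**: If their assumptions were surface-level, suggest specific deeper beliefs to examine. 3. **Self-Awareness (from Perpetuations)**: If they struggled to see their own role, provide specific behaviors to watch for. 4. **Action Plan Quality**: If their plan was vague, provide specific ways to make it more actionable. Select the 1-2 dimensions with the most opportunity for growth and provide specific, implementable recommendations."
--         }
--
--     stages = [i.get('stage', '') for i in ai_interaction_log]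
--     present = set(stages)
--
--     analysis = ("AI Interaction Log Analysis: During this session, you received AI assistance on "
--                 + str(len(ai_interaction_log))
--                 + " occasion(s) across the following stages: "
--                 + ", ".join(stages)
--                 + ". Use this information to provide adaptive feedback that recognizes whether the user incorporated AI suggestions effectively or missed valuable opportunities for improvement.")
--
--     strengths = _STRENGTH_HEADER
--     growth = _GROWTH_HEADER
--     for triggers, q, s_hint, g_q, g_hint in _DIMS:
--         hit = any(t in present for t in triggers)
--         strengths += q + " " + (s_hint if hit else "") + " "
--         growth += g_q + (g_hint if hit else "")
--     strengths += _STRENGTH_TAIL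
--     growth += _GROWTH_TAIL
--
--     return {
--         "aiInteractionAnalysis": analysis,
--         "feedbackStrengths": strengths,
--         "feedbackGrowth": growth,
--     }
-- ===== Notes on version B (the rewrite author's own statement) =====
-- stated objective: alternative
-- what changed: Replaces A's four separate any() scans over the log and its two monolithic f-string/parts constructions with one pass that collects the set of stages plus a single loop over a dimension table that derives each flag by membership and assembles both feedback strings chunk by chunk.
import Mathlib
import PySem

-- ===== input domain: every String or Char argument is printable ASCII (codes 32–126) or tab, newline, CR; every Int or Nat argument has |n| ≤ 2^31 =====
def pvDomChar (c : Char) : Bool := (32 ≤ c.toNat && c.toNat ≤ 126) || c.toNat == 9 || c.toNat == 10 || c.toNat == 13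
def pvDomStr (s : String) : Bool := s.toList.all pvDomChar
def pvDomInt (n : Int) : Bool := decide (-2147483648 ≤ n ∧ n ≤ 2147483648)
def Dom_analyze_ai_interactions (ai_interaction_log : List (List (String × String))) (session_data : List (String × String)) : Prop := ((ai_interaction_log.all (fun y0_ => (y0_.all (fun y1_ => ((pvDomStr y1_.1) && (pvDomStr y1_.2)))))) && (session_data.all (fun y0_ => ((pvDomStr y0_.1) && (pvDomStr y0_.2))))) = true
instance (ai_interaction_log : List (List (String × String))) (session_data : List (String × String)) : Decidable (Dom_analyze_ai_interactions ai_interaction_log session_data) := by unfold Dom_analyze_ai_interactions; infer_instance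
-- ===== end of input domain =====

set_option maxRecDepth 40000
set_option maxHeartbeats 4000000

-- B is a table-driven rewrite (one pass collecting the stage set, one loop over a dimension table
-- assembling both feedback strings) of A's four any() scans and monolithic string constructions;
-- objective: alternative/simpler structure, same cost. Equivalence of the RETURN value is proved on all inputs.

-- ===== PORT A =====
def analyze_ai_interactions (ai_interaction_log : List (List (String × String))) (session_data : List (String × String)) : List (String × String) :=
  if ai_interaction_log.isEmpty then
    [("aiInteractionAnalysis", "No AI interactions were recorded during this session."),
     ("feedbackStrengths", "Provide a concise analysis of where the user's thinking was most effective. Your analysis must specifically evaluate their performance on the following four dimensions: 1. **Root Cause Identification**: Did they distinguish between symptoms and true root causes? 2. **Assumption Surfacing**: Did they uncover non-obvious or deeply held assumptions? 3. **Self-Awareness (from Perpetuations)**: Did they identify specific, plausible actions that could perpetuate the problem and acknowledge their own role? 4. **Action Plan Quality**: Is their action plan specific, measurable, and directly linked to the root causes? Select the 1-2 dimensions where the user showed the most strength and provide specific examples from their session inputs."),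
     ("feedbackGrowth", "Provide specific, actionable recommendations for improvement. Your analysis must evaluate their performance on the same four dimensions and provide concrete next steps: 1. **Root Cause Identification**: If they mistook symptoms for root causes, explain why and suggest deeper causes to explore. 2. **Assumption Surfacing**: If their assumptions were surface-level, suggest specific deeper beliefs to examine. 3. **Self-Awareness (from Perpetuations)**: If they struggled to see their own role, provide specific behaviors to watch for. 4. **Action Plan Quality**: If their plan was vague, provide specific ways to make it more actionable. Select the 1-2 dimensions with the most opportunity for growth and provide specific, implementable recommendations.")]
  else
    let stages := ai_interaction_log.map (fun i => PySem.Dict.getD (PySem.Dict.mk i) "stage" "")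
    let ai_interaction_analysis := "AI Interaction Log Analysis: During this session, you received AI assistance on " ++ PySem.Int.toStr (Int.ofNat ai_interaction_log.length) ++ " occasion(s) across the following stages: " ++ PySem.Str.join ", " stages ++ ". Use this information to provide adaptive feedback that recognizes whether the user incorporated AI suggestions effectively or missed valuable opportunities for improvement."
    let has_root_cause := ai_interaction_log.any (fun i => PySem.Dict.get? (PySem.Dict.mk i) "stage" == some "root_cause")
    let has_assumptions := ai_interaction_log.any (fun i => PySem.Dict.get? (PySem.Dict.mk i) "stage" == some "identify_assumptions")
    let has_perpetuation := ai_interaction_log.any (fun i => PySem.Dict.get? (PySem.Dict.mk i) "stage" == some "perpetuation")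
    let has_actions := ai_interaction_log.any (fun i =>
      match PySem.Dict.get? (PySem.Dict.mk i) "stage" with
      | some s => ["potential_actions", "action_planning"].contains s
      | none => false)
    let feedback_strengths := "Provide a concise analysis of where the user's thinking was most effective, taking into account their " ++ (if ai_interaction_log.length > 0 then "engagement with AI assistance" else "independent work") ++ ". Your analysis must specifically evaluate their performance on the following four dimensions: 1. **Root Cause Identification**: Did they distinguish between symptoms and true root causes? " ++ (if has_root_cause then "Consider how they responded to AI guidance on root causes." else "") ++ " 2. **Assumption Surfacing**: Did they uncover non-obvious or deeply held assumptions? " ++ (if has_assumptions then "Consider how they engaged with AI assistance on assumptions." else "") ++ " 3. **Self-Awareness (from Perpetuations)**: Did they identify specific, plausible actions that could perpetuate the problem and acknowledge their own role? " ++ (if has_perpetuation then "Consider how they responded to AI guidance on perpetuation patterns." else "") ++ " 4. **Action Plan Quality**: Is their action plan specific, measurable, and directly linked to the root causes? " ++ (if has_actions then "Consider how they incorporated AI feedback on their action planning." else "") ++ " Select the 1-2 dimensions where the user showed the most strength and provide specific examples from their session inputs."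
    let parts : List String := ["Provide specific, actionable recommendations for improvement, considering their ",
      (if ai_interaction_log.length > 0 then "use of AI assistance" else "independent approach"),
      ". Your analysis must evaluate their performance on the same four dimensions and provide concrete next steps: ",
      "1. **Root Cause Identification**: If they mistook symptoms for root causes, explain why and suggest deeper causes to explore. "]
    let parts := if has_root_cause then parts ++ ["If they received AI guidance on root causes but didn't fully incorporate it, gently challenge them to revisit those insights. "] else parts
    let parts := parts ++ ["2. **Assumption Surfacing**: If their assumptions were surface-level, suggest specific deeper beliefs to examine. "]
    let parts := if has_assumptions then parts ++ ["If they received AI help with assumptions but didn't act on it, encourage them to test those assumptions. "] else parts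
    let parts := parts ++ ["3. **Self-Awareness (from Perpetuations)**: If they struggled to see their own role, provide specific behaviors to watch for. "]
    let parts := if has_perpetuation then parts ++ ["If they received AI insights about perpetuation patterns but didn't acknowledge their role, provide specific examples to watch for. "] else parts
    let parts := parts ++ ["4. **Action Plan Quality**: If their plan was vague, provide specific ways to make it more actionable. "]
    let parts := if has_actions then parts ++ ["If they received AI feedback on their actions but didn't refine them, suggest specific improvements. "] else parts
    let parts := parts ++ ["Select the 1-2 dimensions with the most opportunity for growth and provide specific, implementable recommendations."]
    let feedback_growth := PySem.Str.join "" parts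
    [("aiInteractionAnalysis", ai_interaction_analysis),
     ("feedbackStrengths", feedback_strengths),
     ("feedbackGrowth", feedback_growth)]

-- ===== PORT B =====
-- B-side helpers: the dimension table and the fixed header/tail strings of Source B
def pvStrengthHeader : String := "Provide a concise analysis of where the user's thinking was most effective, taking into account their engagement with AI assistance. Your analysis must specifically evaluate their performance on the following four dimensions: "
def pvStrengthTail : String := "Select the 1-2 dimensions where the user showed the most strength and provide specific examples from their session inputs."
def pvGrowthHeader : String := "Provide specific, actionable recommendations for improvement, considering their use of AI assistance. Your analysis must evaluate their performance on the same four dimensions and provide concrete next steps: "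
def pvGrowthTail : String := "Select the 1-2 dimensions with the most opportunity for growth and provide specific, implementable recommendations."
def pvDims : List (List String × String × String × String × String) :=
  [(["root_cause"], "1. **Root Cause Identification**: Did they distinguish between symptoms and true root causes?", "Consider how they responded to AI guidance on root causes.", "1. **Root Cause Identification**: If they mistook symptoms for root causes, explain why and suggest deeper causes to explore. ", "If they received AI guidance on root causes but didn't fully incorporate it, gently challenge them to revisit those insights. "),
   (["identify_assumptions"], "2. **Assumption Surfacing**: Did they uncover non-obvious or deeply held assumptions?", "Consider how they engaged with AI assistance on assumptions.", "2. **Assumption Surfacing**: If their assumptions were surface-level, suggest specific deeper beliefs to examine. ", "If they received AI help with assumptions but didn't act on it, encourage them to test those assumptions. "),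
   (["perpetuation"], "3. **Self-Awareness (from Perpetuations)**: Did they identify specific, plausible actions that could perpetuate the problem and acknowledge their own role?", "Consider how they responded to AI guidance on perpetuation patterns.", "3. **Self-Awareness (from Perpetuations)**: If they struggled to see their own role, provide specific behaviors to watch for. ", "If they received AI insights about perpetuation patterns but didn't acknowledge their role, provide specific examples to watch for. "),
   (["potential_actions", "action_planning"], "4. **Action Plan Quality**: Is their action plan specific, measurable, and directly linked to the root causes?", "Consider how they incorporated AI feedback on their action planning.", "4. **Action Plan Quality**: If their plan was vague, provide specific ways to make it more actionable. ", "If they received AI feedback on their actions but didn't refine them, suggest specific improvements. ")]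

def analyze_ai_interactions_alt (ai_interaction_log : List (List (String × String))) (session_data : List (String × String)) : List (String × String) :=
  if ai_interaction_log.isEmpty then
    [("aiInteractionAnalysis", "No AI interactions were recorded during this session."),
     ("feedbackStrengths", "Provide a concise analysis of where the user's thinking was most effective. Your analysis must specifically evaluate their performance on the following four dimensions: 1. **Root Cause Identification**: Did they distinguish between symptoms and true root causes? 2. **Assumption Surfacing**: Did they uncover non-obvious or deeply held assumptions? 3. **Self-Awareness (from Perpetuations)**: Did they identify specific, plausible actions that could perpetuate the problem and acknowledge their own role? 4. **Action Plan Quality**: Is their action plan specific, measurable, and directly linked to the root causes? Select the 1-2 dimensions where the user showed the most strength and provide specific examples from their session inputs."),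
     ("feedbackGrowth", "Provide specific, actionable recommendations for improvement. Your analysis must evaluate their performance on the same four dimensions and provide concrete next steps: 1. **Root Cause Identification**: If they mistook symptoms for root causes, explain why and suggest deeper causes to explore. 2. **Assumption Surfacing**: If their assumptions were surface-level, suggest specific deeper beliefs to examine. 3. **Self-Awareness (from Perpetuations)**: If they struggled to see their own role, provide specific behaviors to watch for. 4. **Action Plan Quality**: If their plan was vague, provide specific ways to make it more actionable. Select the 1-2 dimensions with the most opportunity for growth and provide specific, implementable recommendations.")]
  else
    let stages := ai_interaction_log.map (fun i => PySem.Dict.getD (PySem.Dict.mk i) "stage" "")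
    let present := PySem.Set.ofList stages
    let analysis := "AI Interaction Log Analysis: During this session, you received AI assistance on " ++ PySem.Int.toStr (Int.ofNat ai_interaction_log.length) ++ " occasion(s) across the following stages: " ++ PySem.Str.join ", " stages ++ ". Use this information to provide adaptive feedback that recognizes whether the user incorporated AI suggestions effectively or missed valuable opportunities for improvement."
    let sg := pvDims.foldl (fun (acc : String × String) d =>
        let hit := d.1.any (fun t => PySem.Set.contains present t)
        (acc.1 ++ d.2.1 ++ " " ++ (if hit then d.2.2.1 else "") ++ " ",
         acc.2 ++ d.2.2.2.1 ++ (if hit then d.2.2.2.2 else "")))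
      (pvStrengthHeader, pvGrowthHeader)
    [("aiInteractionAnalysis", analysis),
     ("feedbackStrengths", sg.1 ++ pvStrengthTail),
     ("feedbackGrowth", sg.2 ++ pvGrowthTail)]

-- ===== PRECONDITION & SPEC =====
def Spec_analyze_ai_interactions (ai_interaction_log : List (List (String × String))) (session_data : List (String × String)) (out : List (String × String)) : Prop := out = analyze_ai_interactions_alt ai_interaction_log session_data
instance (ai_interaction_log : List (List (String × String))) (session_data : List (String × String)) (out : List (String × String)) : Decidable (Spec_analyze_ai_interactions ai_interaction_log session_data out) := by unfold Spec_analyze_ai_interactions; infer_instance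

-- ===== CLAIM (what is proved, stated in full; the proofs are below) =====
def Claim_equal_analyze_ai_interactions : Prop := ∀ (ai_interaction_log : List (List (String × String))) (session_data : List (String × String)), Dom_analyze_ai_interactions ai_interaction_log session_data → Spec_analyze_ai_interactions ai_interaction_log session_data (analyze_ai_interactions ai_interaction_log session_data)

-- ===== LEMMAS AND PROOFS =====

-- A's any-scan for one stage equals B's membership test in the stage set (t is never the "" default).
lemma pv_flag_eq (log : List (List (String × String))) (t : String) (ht : t ≠ "") :
    (log.any fun i => PySem.Dict.get? (PySem.Dict.mk i) "stage" == some t)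
    = PySem.Set.contains (PySem.Set.ofList (log.map fun i => PySem.Dict.getD (PySem.Dict.mk i) "stage" "")) t := by
  rw [Bool.eq_iff_iff]
  simp only [List.any_eq_true, PySem.Set.contains_iff, PySem.Set.mem_ofList, List.mem_map,
    beq_iff_eq, PySem.Dict.getD_eq_get?_getD]
  constructor
  · rintro ⟨i, hi, h⟩; exact ⟨i, hi, by rw [h]; rfl⟩
  · rintro ⟨i, hi, h⟩
    refine ⟨i, hi, ?_⟩
    cases hg : PySem.Dict.get? (PySem.Dict.mk i) "stage" with
    | none => exact absurd (by simpa [hg] using h) ht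
    | some s => simpa [hg] using h

-- A's membership-in-two-stages scan equals the disjunction of two membership tests.
lemma pv_actions_eq (log : List (List (String × String))) :
    (log.any fun i =>
      match PySem.Dict.get? (PySem.Dict.mk i) "stage" with
      | some s => ["potential_actions", "action_planning"].contains s
      | none => false)
    = ((PySem.Set.contains (PySem.Set.ofList (log.map fun i => PySem.Dict.getD (PySem.Dict.mk i) "stage" "")) "potential_actions")
       || (PySem.Set.contains (PySem.Set.ofList (log.map fun i => PySem.Dict.getD (PySem.Dict.mk i) "stage" "")) "action_planning")) := by
  rw [← pv_flag_eq log "potential_actions" (by decide), ← pv_flag_eq log "action_planning" (by decide)]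
  induction log with
  | nil => rfl
  | cons x xs ih =>
    simp only [List.any_cons, ih]
    cases hg : PySem.Dict.get? (PySem.Dict.mk x) "stage" with
    | none => simp
    | some s =>
      by_cases h1 : s = "potential_actions" <;> by_cases h2 : s = "action_planning" <;>
        simp [beq_eq_decide, h1, h2, Bool.or_assoc, Bool.or_left_comm]

-- "".join over char lists distributes over appending one element
lemma pv_cjoin_append (l : List (List Char)) (c : List Char) :
    PySem.Chars.join [] (l ++ [c]) = PySem.Chars.join [] l ++ c := by
  induction l with
  | nil => simp [PySem.Chars.join_nil, PySem.Chars.join_singleton]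
  | cons a as ih =>
    cases as with
    | nil => simp [PySem.Chars.join_singleton, PySem.Chars.join_cons_cons]
    | cons b bs =>
      simp only [List.cons_append, PySem.Chars.join_cons_cons] at ih ⊢
      simp [ih]

@[simp] lemma pv_join_append (xs : List String) (x : String) :
    PySem.Str.join "" (xs ++ [x]) = PySem.Str.join "" xs ++ x := by
  simp [PySem.Str.join, pv_cjoin_append]

@[simp] lemma pv_join_if (b : Bool) (p : List String) (x : String) :
    PySem.Str.join "" (if b then p ++ [x] else p)
    = PySem.Str.join "" p ++ (if b then x else "") := by
  cases b <;> simp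

-- ===== VERDICT (by name: the statement is the Claim_ definition above) =====
theorem analyze_ai_interactions_spec : Claim_equal_analyze_ai_interactions := by
  intro log sd _
  unfold Spec_analyze_ai_interactions
  by_cases h : log.isEmpty = true
  · unfold analyze_ai_interactions analyze_ai_interactions_alt
    rw [if_pos h, if_pos h]
  · unfold analyze_ai_interactions analyze_ai_interactions_alt
    rw [if_neg h, if_neg h]
    have hlen : log.length > 0 := by
      cases log with
      | nil => simp at h
      | cons a l => simp
    simp only [pvDims, List.foldl, List.any_cons, List.any_nil, Bool.or_false,
      pv_flag_eq log "root_cause" (by decide), pv_flag_eq log "identify_assumptions" (by decide),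
      pv_flag_eq log "perpetuation" (by decide), pv_actions_eq log, if_pos hlen,
      pv_join_append, pv_join_if]
    have eG0 : PySem.Str.join "" ["Provide specific, actionable recommendations for improvement, considering their ", "use of AI assistance", ". Your analysis must evaluate their performance on the same four dimensions and provide concrete next steps: ", "1. **Root Cause Identification**: If they mistook symptoms for root causes, explain why and suggest deeper causes to explore. "]
        = pvGrowthHeader ++ "1. **Root Cause Identification**: If they mistook symptoms for root causes, explain why and suggest deeper causes to explore. " := by decide
    have eS1 : ("Provide a concise analysis of where the user's thinking was most effective, taking into account their " : String) ++ "engagement with AI assistance" ++ ". Your analysis must specifically evaluate their performance on the following four dimensions: 1. **Root Cause Identification**: Did they distinguish between symptoms and true root causes? "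
        = pvStrengthHeader ++ "1. **Root Cause Identification**: Did they distinguish between symptoms and true root causes?" ++ " " := by decide
    have eS2 : (" 2. **Assumption Surfacing**: Did they uncover non-obvious or deeply held assumptions? " : String) = " " ++ "2. **Assumption Surfacing**: Did they uncover non-obvious or deeply held assumptions?" ++ " " := by decide
    have eS3 : (" 3. **Self-Awareness (from Perpetuations)**: Did they identify specific, plausible actions that could perpetuate the problem and acknowledge their own role? " : String) = " " ++ "3. **Self-Awareness (from Perpetuations)**: Did they identify specific, plausible actions that could perpetuate the problem and acknowledge their own role?" ++ " " := by decide
    have eS4 : (" 4. **Action Plan Quality**: Is their action plan specific, measurable, and directly linked to the root causes? " : String) = " " ++ "4. **Action Plan Quality**: Is their action plan specific, measurable, and directly linked to the root causes?" ++ " " := by decide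
    have eS5 : (" Select the 1-2 dimensions where the user showed the most strength and provide specific examples from their session inputs." : String) = " " ++ pvStrengthTail := by decide
    have eG5 : ("Select the 1-2 dimensions with the most opportunity for growth and provide specific, implementable recommendations." : String) = pvGrowthTail := by decide
    rw [eG0, eS2, eS3, eS4, eS5, eS1, eG5]
    simp only [String.append_assoc]
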